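/- GENERATED by tools/from_farm_form.py from prooffarm-gif/accepted/DGifGetCodeNext.P/Proof.lean (a worked proof of the farm's unit `DGifGetCodeNext.P`,
   accepted by the verdict) — do not edit. -/
import Gif.Spec.Units.DGifGetCodeNext_P
import Gif.Spec.AllSegs

open X86 X86.User Asan ProgX.Base ProgX.Base.Spec Gif.Spec

set_option maxRecDepth 4000
set_option maxHeartbeats 4000000

/-!
  `DGifGetCodeNext.P` (0x109f40 … 0x109f8c, 16 instructions; dgif_lib.c:779): the prologue of a protected function.
-/

/-- The prologue of `DGifGetCodeNext` establishes `Start` at 0x109f8c. -/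
theorem Gif.Spec.Proved.DGifGetCodeNext_P_ok : Gif.Spec.DGifGetCodeNext_P.Statement := by
  intro Lay hLay μ hμ u₀ hcode H rest frames F R e ret he hpre
  have he0 := he
  v_entry he
  obtain ⟨henv, hrdi, hout⟩ := hpre
  u_walk hcode [hμ.vendor] until [Gif.L.DGifGetCodeNext.at_109f8c] span [ProgX.Base.L.textLo, ProgX.Base.L.textHi] side (v_side)
  -- 2. NAMING THE MEMORY before the two shadow stores (0x109f78, 0x109f82)
  have e120 : (e.reg .rsp - 120).toNat = (e.reg .rsp).toNat - 120 := by u_omega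
  obtain ⟨M0, hM0, hmem⟩ := name_stores2 (e.reg .rsp - 120) 12582912 12582916 0 4 4059165169 4 4 4092850945
    w_mem (by omega) (by decide) (by decide) (by decide) (by decide)
  have hpro : Gif.Frames.DGifGetCodeNext.prologue = [⟨0, 4, 4059165169⟩, ⟨4, 4, 4092850945⟩] := rfl
  rw [← hpro, e120] at hmem
  -- 3. ABOUT `M0`: only stack stores over `e.mem` (six pushes, the frame's three header words)
  have hsame0 : Mem.SameExcept [⟨(e.reg .rsp).toNat - 320, (e.reg .rsp).toNat⟩] e.mem M0 := by
    rw [hM0]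
    u_same
  have k_r15 : M0.readLE (e.reg .rsp - 8) 8 = (e.reg .r15).toNat := by
    rw [hM0]
    u_read
  have k_r14 : M0.readLE (e.reg .rsp - 16) 8 = (e.reg .r14).toNat := by
    rw [hM0]
    u_read
  have k_r13 : M0.readLE (e.reg .rsp - 24) 8 = (e.reg .r13).toNat := by
    rw [hM0]
    u_read
  have k_r12 : M0.readLE (e.reg .rsp - 32) 8 = (e.reg .r12).toNat := by
    rw [hM0]
    u_read
  have k_rbp : M0.readLE (e.reg .rsp - 40) 8 = (e.reg .rbp).toNat := by
    rw [hM0]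
    u_read
  have k_rbx : M0.readLE (e.reg .rsp - 48) 8 = (e.reg .rbx).toNat := by
    rw [hM0]
    u_read
  clear hM0 w_mem
  -- `*CodeBlock` lies above the return-address slot: a live range in [700000H, 800000H) is not below the clean stack's end
  have hwhere := hout.buf.live.where_ henv.heap.inv.shadow henv.heap.shadowPre.offText (by omega)
  have hhigh := hout.buf.high
  have hlow := hout.low
  have habove : (e.reg .rsp).toNat + 8 ≤ (e.reg .rsi).toNat := by
    omega
  -- 4. THE ENVIRONMENT behind the prologue
  obtain ⟨hinv1, hok1, hrem1⟩ := after_prologue (top := (e.reg .rsp).toNat) (top' := (e.reg .rsp).toNat - 136) (ro := 120)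
    (Fl := Gif.Frames.DGifGetCodeNext) henv.heap.inv henv.ctx henv.ok Gif.Frames.DGifGetCodeNext_ok rfl he_align hsame0
    (by omega) (by omega) (by omega) (by omega)
  have hsame1 := prologue_same (top := (e.reg .rsp).toNat) (Fl := Gif.Frames.DGifGetCodeNext) Gif.Frames.DGifGetCodeNext_ok
    (ro := 120) (ro' := 56) rfl rfl he_align (by omega) (by omega) hsame0 []
  have hsame2 := prologue_same (top := (e.reg .rsp).toNat) (Fl := Gif.Frames.DGifGetCodeNext) Gif.Frames.DGifGetCodeNext_ok
    (ro := 120) (ro' := 56) rfl rfl he_align (by omega) (by omega) hsame0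
    [⟨F.pv + 56, F.pv + 64⟩,
     ⟨F.pv + 88, F.pv + 344⟩,
     ⟨(e.reg .rsi).toNat, (e.reg .rsi).toNat + 8⟩,
     ⟨F.gif + 96, F.gif + 100⟩,
     ⟨R.cur, R.cur + 8⟩]
  have hin : ∀ s, s ∈ Gif.Frames.DGifGetCodeNext.prologue → s.idx + s.width ≤ 8 := by decide
  rw [← hmem] at hinv1 hok1 hrem1 hsame1 hsame2
  -- 5. THE EXIT ASSERTION: `Body` at 0x109f8c (`lea rdi, [rdi + 70H]`, dgif_lib.c:781) …
  have hbody : DGifGetCodeNext.Body Gif.L.DGifGetCodeNext.at_109f8c H rest frames F R u₀ e ret s_109f82 := {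
    entry := he0
    pre := ⟨henv, hrdi, hout⟩
    block_above := habove
    rip := w_rip
    rsp := w_rsp
    rbx := w_rbx
    r13 := w_r13
    rbp := w_rbp
    -- a slot is read THROUGH the shadow stores (`readLE_storesMem`), then in `M0`
    slot_r15 := by
      rw [hmem, readLE_storesMem M0 _ 8 _ hin (by omega) _ _ (by u_omega)]
      exact k_r15
    slot_r14 := by
      rw [hmem, readLE_storesMem M0 _ 8 _ hin (by omega) _ _ (by u_omega)]
      exact k_r14
    slot_r13 := by
      rw [hmem, readLE_storesMem M0 _ 8 _ hin (by omega) _ _ (by u_omega)]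
      exact k_r13
    slot_r12 := by
      rw [hmem, readLE_storesMem M0 _ 8 _ hin (by omega) _ _ (by u_omega)]
      exact k_r12
    slot_rbp := by
      rw [hmem, readLE_storesMem M0 _ 8 _ hin (by omega) _ _ (by u_omega)]
      exact k_rbp
    slot_rbx := by
      rw [hmem, readLE_storesMem M0 _ 8 _ hin (by omega) _ _ (by u_omega)]
      exact k_rbx
    -- the return address: the prologue's footprint ends below its slot
    slot_ra := by
      rw [prologue_same_readLE hsame1 (e.reg .rsp) 8 (Nat.le_refl _) (by omega)]
      exact he_retAddr
    inv := hinv1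
    ok := hok1
    rem := Nat.le_of_eq hrem1
    same := hsame2
    code := ProgX.Base.conv_code_in w_eq
    -- DF and MXCSR by hand (`v_inv` is slow behind a walk with shadow stores)
    abi := by
      refine ProgX.Base.abiInv_of ?_ ?_
      · rw [w_flags]
        simp only [X86.User.df_setStatus]
        exact he_df
      · rw [w_mxcsr]
        exact he_mx
  }
  -- … and what only the first body segment may use: `rdi` still holds gif, the reader did not move
  refine ReachVia.done ?_
  exact {
    body := hbody
    rdi := w_kept.get .rdi rfl
    rem_eq := hrem1
  }
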